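-- pv_equiv track=rewrite | github.com/ciornav/line-charts-vs-colorfields | helpers/study_helpers/moo_helpers.py | get_rotating_index
-- ===== SOURCE A (Python) =====
-- def get_rotating_index(index_selected_value : int, slider_possible_values : list, number_of_steps_in_neighborhood: int = 3) -> list:
--     indexes_around_pareto = []
--     for ind in range(number_of_steps_in_neighborhood):
--         inferior_index = index_selected_value - (ind +1)
--         superior_index = index_selected_value + (ind +1)
--         if inferior_index >= 0 :
--             indexes_around_pareto.append(inferior_index)
--         if superior_index < len(slider_possible_values):
--             indexes_around_pareto.append(superior_index)
--     return indexes_around_pareto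
-- ===== SOURCE B (Python) =====
-- def get_rotating_index(index_selected_value: int, slider_possible_values: list, number_of_steps_in_neighborhood: int = 3) -> list:
--     n = len(slider_possible_values)
--     ks = range(1, number_of_steps_in_neighborhood + 1)
--     inferiors = [index_selected_value - k for k in ks if index_selected_value - k >= 0]
--     superiors = [index_selected_value + k for k in ks if index_selected_value + k < n]
--     out = []
--     for a, b in zip(inferiors, superiors):
--         out.append(a)
--         out.append(b)
--     m = min(len(inferiors), len(superiors))
--     out.extend(inferiors[m:])
--     out.extend(superiors[m:])
--     return out
-- ===== Notes on version B (the rewrite author's own statement) =====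
-- stated objective: alternative
-- what changed: B builds the lower and upper neighbor lists in two separate comprehension passes and then interleaves them with a zip-style merge, instead of A's single loop with two conditional appends per step; correctness rests on both candidate lists being prefix-contiguous.
import Mathlib
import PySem

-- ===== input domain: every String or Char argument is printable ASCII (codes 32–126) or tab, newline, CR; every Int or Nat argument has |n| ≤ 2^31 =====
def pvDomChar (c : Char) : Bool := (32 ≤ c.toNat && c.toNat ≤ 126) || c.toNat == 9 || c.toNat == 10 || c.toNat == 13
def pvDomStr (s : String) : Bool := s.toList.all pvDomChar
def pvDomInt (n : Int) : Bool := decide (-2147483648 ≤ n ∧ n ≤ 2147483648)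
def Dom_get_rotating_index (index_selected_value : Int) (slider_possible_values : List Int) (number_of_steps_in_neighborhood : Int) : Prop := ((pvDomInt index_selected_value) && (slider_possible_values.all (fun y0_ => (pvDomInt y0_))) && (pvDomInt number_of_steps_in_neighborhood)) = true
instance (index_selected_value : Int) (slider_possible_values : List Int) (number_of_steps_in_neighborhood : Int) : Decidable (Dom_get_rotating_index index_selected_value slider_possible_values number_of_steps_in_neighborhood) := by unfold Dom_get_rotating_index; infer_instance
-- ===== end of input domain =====

-- B builds the inferior and superior neighbor lists in two separate passes and merges them by
-- interleaving; A appends both conditionally inside one loop. Same cost, different decomposition.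

-- ===== PORT A =====
def get_rotating_index (index_selected_value : Int) (slider_possible_values : List Int) (number_of_steps_in_neighborhood : Int) : List Int :=
  (PySem.List.pyRange 0 number_of_steps_in_neighborhood 1).foldl
    (fun indexes_around_pareto ind =>
      let inferior_index := index_selected_value - (ind + 1)
      let superior_index := index_selected_value + (ind + 1)
      let indexes_around_pareto :=
        if inferior_index ≥ 0 then indexes_around_pareto ++ [inferior_index] else indexes_around_pareto
      if superior_index < (slider_possible_values.length : Int) then
        indexes_around_pareto ++ [superior_index]
      else indexes_around_pareto) []

-- ===== PORT B =====
-- zip-style merge: pairs while both lists last, then the leftover tail (Source B's zip loop + extends)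
def pvInterleave : List Int → List Int → List Int
  | [], ys => ys
  | x :: xs, [] => x :: xs
  | x :: xs, y :: ys => x :: y :: pvInterleave xs ys

def get_rotating_index_alt (index_selected_value : Int) (slider_possible_values : List Int) (number_of_steps_in_neighborhood : Int) : List Int :=
  let n : Int := slider_possible_values.length
  let ks := PySem.List.pyRange 1 (number_of_steps_in_neighborhood + 1) 1
  let inferiors := (ks.filter (fun k => decide (index_selected_value - k ≥ 0))).map (fun k => index_selected_value - k)
  let superiors := (ks.filter (fun k => decide (index_selected_value + k < n))).map (fun k => index_selected_value + k)
  pvInterleave inferiors superiors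

-- ===== PRECONDITION & SPEC =====
def Spec_get_rotating_index (index_selected_value : Int) (slider_possible_values : List Int) (number_of_steps_in_neighborhood : Int) (out : List Int) : Prop := out = get_rotating_index_alt index_selected_value slider_possible_values number_of_steps_in_neighborhood
instance (index_selected_value : Int) (slider_possible_values : List Int) (number_of_steps_in_neighborhood : Int) (out : List Int) : Decidable (Spec_get_rotating_index index_selected_value slider_possible_values number_of_steps_in_neighborhood out) := by unfold Spec_get_rotating_index; infer_instance

-- ===== CLAIM (what is proved, stated in full; the proofs are below) =====
def Claim_equal_get_rotating_index : Prop := ∀ (index_selected_value : Int) (slider_possible_values : List Int) (number_of_steps_in_neighborhood : Int), Dom_get_rotating_index index_selected_value slider_possible_values number_of_steps_in_neighborhood → Spec_get_rotating_index index_selected_value slider_possible_values number_of_steps_in_neighborhood (get_rotating_index index_selected_value slider_possible_values number_of_steps_in_neighborhood)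

-- ===== LEMMAS AND PROOFS =====

theorem pvInterleave_nil_right (xs : List Int) : pvInterleave xs [] = xs := by
  cases xs <;> rfl

-- if P fails everywhere on L, only the Q-parts remain
theorem pvFlatMap_noP (P Q : Int → Bool) (g h : Int → Int) (L : List Int)
    (hP : ∀ y ∈ L, P y = false) :
    L.flatMap (fun k => (if P k then [g k] else []) ++ (if Q k then [h k] else []))
      = (L.filter Q).map h := by
  induction L with
  | nil => rfl
  | cons x t ih =>
    have hx := hP x (List.mem_cons_self)
    simp only [List.flatMap_cons, List.filter_cons, hx]
    rw [ih (fun y hy => hP y (List.mem_cons_of_mem _ hy))]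
    by_cases hq : Q x = true <;> simp [hq]

theorem pvFlatMap_noQ (P Q : Int → Bool) (g h : Int → Int) (L : List Int)
    (hQ : ∀ y ∈ L, Q y = false) :
    L.flatMap (fun k => (if P k then [g k] else []) ++ (if Q k then [h k] else []))
      = (L.filter P).map g := by
  induction L with
  | nil => rfl
  | cons x t ih =>
    have hx := hQ x (List.mem_cons_self)
    simp only [List.flatMap_cons, List.filter_cons, hx]
    rw [ih (fun y hy => hQ y (List.mem_cons_of_mem _ hy))]
    by_cases hp : P x = true <;> simp [hp]

-- main shape lemma: when P and Q each hold on a prefix of L, the one-pass flatMap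
-- equals the interleave of the two filtered passes
theorem pvFlatMap_eq_interleave (P Q : Int → Bool) (g h : Int → Int) :
    ∀ L : List Int,
      L.Pairwise (fun x y => (P y = true → P x = true) ∧ (Q y = true → Q x = true)) →
      L.flatMap (fun k => (if P k then [g k] else []) ++ (if Q k then [h k] else []))
        = pvInterleave ((L.filter P).map g) ((L.filter Q).map h) := by
  intro L
  induction L with
  | nil => intro _; rfl
  | cons x t ih =>
    intro hpw
    rcases List.pairwise_cons.mp hpw with ⟨hhead, htail⟩
    cases hp : P x with
    | true =>
      cases hq : Q x with
      | true =>
        rw [List.flatMap_cons, ih htail, List.filter_cons_of_pos (by simp [hp]),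
          List.filter_cons_of_pos (by simp [hq])]
        simp [hp, hq, pvInterleave]
      | false =>
        have hQall : ∀ y ∈ t, Q y = false := by
          intro y hy
          cases hcy : Q y with
          | false => rfl
          | true => exact absurd ((hhead y hy).2 hcy) (by simp [hq])
        have hfQ : List.filter Q (x :: t) = [] := by
          rw [List.filter_eq_nil_iff]
          intro y hy
          rcases List.mem_cons.mp hy with rfl | hy'
          · simp [hq]
          · simp [hQall y hy']
        rw [List.flatMap_cons, pvFlatMap_noQ P Q g h t hQall, hfQ,
          List.filter_cons_of_pos (by simp [hp])]
        simp [hp, hq, pvInterleave_nil_right]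
    | false =>
      have hPall : ∀ y ∈ t, P y = false := by
        intro y hy
        cases hcy : P y with
        | false => rfl
        | true => exact absurd ((hhead y hy).1 hcy) (by simp [hp])
      have hfP : List.filter P (x :: t) = [] := by
        rw [List.filter_eq_nil_iff]
        intro y hy
        rcases List.mem_cons.mp hy with rfl | hy'
        · simp [hp]
        · simp [hPall y hy']
      rw [List.flatMap_cons, pvFlatMap_noP P Q g h t hPall, hfP]
      cases hq : Q x with
      | true =>
        rw [List.filter_cons_of_pos (by simp [hq])]
        simp [hp, hq, pvInterleave]
      | false =>
        rw [List.filter_cons_of_neg (by simp [hq])]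
        simp [hp, hq, pvInterleave]

-- A's loop body appends (at most) the two candidates of step ind
theorem pvFoldA_eq_flatMap (i n : Int) (L : List Int) :
    L.foldl (fun acc ind =>
      let inf := i - (ind + 1)
      let sup := i + (ind + 1)
      let acc := if inf ≥ 0 then acc ++ [inf] else acc
      if sup < n then acc ++ [sup] else acc) []
    = L.flatMap (fun ind =>
        (if i - (ind + 1) ≥ 0 then [i - (ind + 1)] else []) ++
        (if i + (ind + 1) < n then [i + (ind + 1)] else [])) := by
  have hbody : (fun (acc : List Int) (ind : Int) =>
      let inf := i - (ind + 1)
      let sup := i + (ind + 1)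
      let acc := if inf ≥ 0 then acc ++ [inf] else acc
      if sup < n then acc ++ [sup] else acc)
    = (fun acc ind => acc ++
        ((if i - (ind + 1) ≥ 0 then [i - (ind + 1)] else []) ++
         (if i + (ind + 1) < n then [i + (ind + 1)] else []))) := by
    funext acc ind
    show (if i + (ind + 1) < n then
            (if i - (ind + 1) ≥ 0 then acc ++ [i - (ind + 1)] else acc) ++ [i + (ind + 1)]
          else if i - (ind + 1) ≥ 0 then acc ++ [i - (ind + 1)] else acc)
        = acc ++ ((if i - (ind + 1) ≥ 0 then [i - (ind + 1)] else []) ++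
            (if i + (ind + 1) < n then [i + (ind + 1)] else []))
    split_ifs <;> simp
  rw [hbody, PySem.List.foldl_append_eq_flatMap]
  simp

-- the k-range is the step-range shifted by one
theorem pvRange_shift (s : Int) :
    PySem.List.pyRange 1 (s + 1) 1 = (PySem.List.pyRange 0 s 1).map (fun x => x + 1) := by
  rw [PySem.List.pyRange_one, PySem.List.pyRange_one, List.map_map]
  simp [Int.add_comm]

-- ===== VERDICT (by name: the statement is the Claim_ definition above) =====
theorem get_rotating_index_spec : Claim_equal_get_rotating_index := by
  intro i vals s _
  unfold Spec_get_rotating_index get_rotating_index get_rotating_index_alt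
  dsimp only
  rw [pvFoldA_eq_flatMap i (vals.length : Int)]
  rw [pvRange_shift s]
  rw [List.filter_map, List.filter_map, List.map_map, List.map_map]
  have hpw : ((PySem.List.pyRange 0 s 1).map (fun x => x + 1)).Pairwise
      (fun x y => ((fun k => decide (i - k ≥ 0)) y = true → (fun k => decide (i - k ≥ 0)) x = true) ∧
                  ((fun k => decide (i + k < (vals.length : Int))) y = true →
                   (fun k => decide (i + k < (vals.length : Int))) x = true)) := by
    refine List.Pairwise.map _ ?_ (PySem.List.pairwise_lt_pyRange_one 0 s)
    intro a b hab
    constructor <;> · simp only [decide_eq_true_eq]; intro h; omega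
  have := pvFlatMap_eq_interleave (fun k => decide (i - k ≥ 0))
      (fun k => decide (i + k < (vals.length : Int)))
      (fun k => i - k) (fun k => i + k)
      ((PySem.List.pyRange 0 s 1).map (fun x => x + 1)) hpw
  rw [List.filter_map, List.filter_map, List.map_map, List.map_map, List.flatMap_map] at this
  simp only [Function.comp, decide_eq_true_eq] at this ⊢
  exact this
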